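-- pv_equiv track=rewrite | github.com/devpouya/swissnews | backend/scraper/utils.py | get_language_from_url
-- ===== SOURCE A (Python) =====
-- from typing import Any, Callable, Dict, List, Optional
--
-- def get_language_from_url(url: str) -> Optional[str]:
--     """
--     Attempt to detect language from URL patterns.
--
--     Args:
--         url: URL to analyze
--
--     Returns:
--         Language code (de, fr, it, rm) or None if not detected
--     """
--     if not url:
--         return None
--
--     url_lower = url.lower()
--
--     # Check for language in domain
--     if ".ch" in url_lower:
--         if any(domain in url_lower for domain in ["nzz.ch", "20min.ch", "srf.ch"]):
--             return "de"
--         elif any(domain in url_lower for domain in ["letemps.ch", "rts.ch", "tdg.ch"]):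
--             return "fr"
--         elif any(
--             domain in url_lower for domain in ["cdt.ch", "rsi.ch", "laregione.ch"]
--         ):
--             return "it"
--
--     # Check for language indicators in path
--     if "/de/" in url_lower or "/deutsch/" in url_lower:
--         return "de"
--     elif "/fr/" in url_lower or "/francais/" in url_lower:
--         return "fr"
--     elif "/it/" in url_lower or "/italiano/" in url_lower:
--         return "it"
--     elif "/rm/" in url_lower or "/romansh/" in url_lower:
--         return "rm"
--
--     return None
-- ===== SOURCE B (Python) =====
-- _LANG_PATTERNS = [
--     ("nzz.ch", "de"), ("20min.ch", "de"), ("srf.ch", "de"),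
--     ("letemps.ch", "fr"), ("rts.ch", "fr"), ("tdg.ch", "fr"),
--     ("cdt.ch", "it"), ("rsi.ch", "it"), ("laregione.ch", "it"),
--     ("/de/", "de"), ("/deutsch/", "de"),
--     ("/fr/", "fr"), ("/francais/", "fr"),
--     ("/it/", "it"), ("/italiano/", "it"),
--     ("/rm/", "rm"), ("/romansh/", "rm"),
-- ]
--
-- def get_language_from_url(url):
--     if not url:
--         return None
--     url_lower = url.lower()
--     for pattern, code in _LANG_PATTERNS:
--         if pattern in url_lower:
--             return code
--     return None
-- ===== Notes on version B (the rewrite author's own statement) =====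
-- stated objective: simpler
-- what changed: Replaced A's redundant top-level domain guard and nested any()-grouped branch chains with a single ordered (substring, code) table scanned once, returning the code of the first pattern found.
import Mathlib
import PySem

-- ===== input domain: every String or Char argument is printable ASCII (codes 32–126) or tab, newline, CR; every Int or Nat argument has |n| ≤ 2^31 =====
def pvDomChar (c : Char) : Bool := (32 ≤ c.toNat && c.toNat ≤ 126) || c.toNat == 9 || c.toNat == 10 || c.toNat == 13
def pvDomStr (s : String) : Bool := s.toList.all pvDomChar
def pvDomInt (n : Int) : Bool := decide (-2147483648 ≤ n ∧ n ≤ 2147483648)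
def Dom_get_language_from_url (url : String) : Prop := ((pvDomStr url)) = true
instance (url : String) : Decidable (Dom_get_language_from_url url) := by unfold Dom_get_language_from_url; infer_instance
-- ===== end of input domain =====

-- B replaces A's nested domain/path branch groups by one ordered (pattern, code) table
-- scanned once (objective: simpler); return value only, no side effects involved.

-- ===== PORT A =====
def get_language_from_url (url : String) : Option String :=
  if url = "" then none else
  let url_lower := PySem.Str.lower url
  let domainResult : Option String :=
    if PySem.Str.isIn ".ch" url_lower then
      if ["nzz.ch", "20min.ch", "srf.ch"].any (fun d => PySem.Str.isIn d url_lower) then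
        some "de"
      else if ["letemps.ch", "rts.ch", "tdg.ch"].any (fun d => PySem.Str.isIn d url_lower) then
        some "fr"
      else if ["cdt.ch", "rsi.ch", "laregione.ch"].any (fun d => PySem.Str.isIn d url_lower) then
        some "it"
      else none
    else none
  match domainResult with
  | some r => some r
  | none =>
    if PySem.Str.isIn "/de/" url_lower || PySem.Str.isIn "/deutsch/" url_lower then some "de"
    else if PySem.Str.isIn "/fr/" url_lower || PySem.Str.isIn "/francais/" url_lower then some "fr"
    else if PySem.Str.isIn "/it/" url_lower || PySem.Str.isIn "/italiano/" url_lower then some "it"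
    else if PySem.Str.isIn "/rm/" url_lower || PySem.Str.isIn "/romansh/" url_lower then some "rm"
    else none

-- ===== PORT B =====
def langPatterns : List (String × String) :=
  [("nzz.ch", "de"), ("20min.ch", "de"), ("srf.ch", "de"),
   ("letemps.ch", "fr"), ("rts.ch", "fr"), ("tdg.ch", "fr"),
   ("cdt.ch", "it"), ("rsi.ch", "it"), ("laregione.ch", "it"),
   ("/de/", "de"), ("/deutsch/", "de"),
   ("/fr/", "fr"), ("/francais/", "fr"),
   ("/it/", "it"), ("/italiano/", "it"),
   ("/rm/", "rm"), ("/romansh/", "rm")]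

def get_language_from_url_alt (url : String) : Option String :=
  if url = "" then none else
  let url_lower := PySem.Str.lower url
  (langPatterns.find? (fun p => PySem.Str.isIn p.1 url_lower)).map (·.2)

-- ===== PRECONDITION & SPEC =====
def Spec_get_language_from_url (url : String) (out : Option String) : Prop := out = get_language_from_url_alt url
instance (url : String) (out : Option String) : Decidable (Spec_get_language_from_url url out) := by unfold Spec_get_language_from_url; infer_instance

-- ===== CLAIM (what is proved, stated in full; the proofs are below) =====
def Claim_equal_get_language_from_url : Prop := ∀ (url : String), Dom_get_language_from_url url → Spec_get_language_from_url url (get_language_from_url url)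

-- ===== LEMMAS AND PROOFS =====

-- if a whole domain pattern (which itself contains ".ch") occurs in s, so does ".ch"
theorem isIn_ch_of_isIn (d s : String) (hd : (".ch").toList <:+: d.toList)
    (h : PySem.Str.isIn d s = true) : PySem.Str.isIn ".ch" s = true := by
  rw [PySem.Str.isIn_iff_infix] at h ⊢
  exact hd.trans h

-- B's 'first matching (pattern, code)' scan, written as a right fold of if-chains
theorem find?_snd_eq_foldr {α β : Type} (p : α × β → Bool) (t : List (α × β)) :
    ((t.find? p).map (·.2)) = t.foldr (fun q acc => if p q then some q.2 else acc) none := by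
  induction t with
  | nil => simp
  | cons a l ih => by_cases h : p a <;> simp [h, ih]

-- boolean skeleton shared by A's grouped branches and B's linear scan:
-- c is the ".ch" guard, d*/e*/f* the domain checks, p* the path checks
theorem branch_shape (c d1 d2 d3 e1 e2 e3 f1 f2 f3 p1 p2 p3 p4 p5 p6 p7 p8 : Bool)
    (hc : (d1 || d2 || d3 || e1 || e2 || e3 || f1 || f2 || f3) = true → c = true) :
    (match (if c = true then
        (if (d1 || (d2 || d3)) = true then some "de"
         else if (e1 || (e2 || e3)) = true then some "fr"
         else if (f1 || (f2 || f3)) = true then some "it"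
         else none) else none) with
     | some r => some r
     | none =>
       if (p1 || p2) = true then some "de"
       else if (p3 || p4) = true then some "fr"
       else if (p5 || p6) = true then some "it"
       else if (p7 || p8) = true then some "rm"
       else none) =
    (if d1 = true then some "de" else if d2 = true then some "de" else if d3 = true then some "de"
     else if e1 = true then some "fr" else if e2 = true then some "fr" else if e3 = true then some "fr"
     else if f1 = true then some "it" else if f2 = true then some "it" else if f3 = true then some "it"
     else if p1 = true then some "de" else if p2 = true then some "de"
     else if p3 = true then some "fr" else if p4 = true then some "fr"
     else if p5 = true then some "it" else if p6 = true then some "it"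
     else if p7 = true then some "rm" else if p8 = true then some "rm" else none) := by
  have hp12 : (if (p1 || p2) = true then (some "de" : Option String)
      else if (p3 || p4) = true then some "fr"
      else if (p5 || p6) = true then some "it"
      else if (p7 || p8) = true then some "rm" else none) =
      (if p1 = true then some "de" else if p2 = true then some "de"
       else if p3 = true then some "fr" else if p4 = true then some "fr"
       else if p5 = true then some "it" else if p6 = true then some "it"
       else if p7 = true then some "rm" else if p8 = true then some "rm" else none) := by
    cases p1 <;> cases p2 <;> cases p3 <;> cases p4 <;> cases p5 <;> cases p6 <;>
      cases p7 <;> cases p8 <;> simp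
  rw [hp12]
  cases c
  · have hall : (d1 || d2 || d3 || e1 || e2 || e3 || f1 || f2 || f3) = false := by
      cases h : (d1 || d2 || d3 || e1 || e2 || e3 || f1 || f2 || f3)
      · rfl
      · exact Bool.noConfusion (hc h)
    simp only [Bool.or_eq_false_iff] at hall
    obtain ⟨⟨⟨⟨⟨⟨⟨⟨hd1, hd2⟩, hd3⟩, he1⟩, he2⟩, he3⟩, hf1⟩, hf2⟩, hf3⟩ := hall
    subst hd1 hd2 hd3 he1 he2 he3 hf1 hf2 hf3
    simp
  · cases d1 <;> cases d2 <;> cases d3 <;> cases e1 <;> cases e2 <;> cases e3 <;>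
      cases f1 <;> cases f2 <;> cases f3 <;> simp

-- ===== VERDICT (by name: the statement is the Claim_ definition above) =====
set_option maxHeartbeats 1000000 in
theorem get_language_from_url_spec : Claim_equal_get_language_from_url := by
  intro url _
  unfold Spec_get_language_from_url get_language_from_url get_language_from_url_alt langPatterns
  by_cases h0 : url = ""
  · simp [h0]
  · simp only [h0, if_false]
    rw [find?_snd_eq_foldr]
    simp only [List.any_cons, List.any_nil, Bool.or_false, List.foldr_cons, List.foldr_nil]
    set ul := PySem.Str.lower url with hul
    exact branch_shape (PySem.Str.isIn ".ch" ul)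
      (PySem.Str.isIn "nzz.ch" ul) (PySem.Str.isIn "20min.ch" ul) (PySem.Str.isIn "srf.ch" ul)
      (PySem.Str.isIn "letemps.ch" ul) (PySem.Str.isIn "rts.ch" ul) (PySem.Str.isIn "tdg.ch" ul)
      (PySem.Str.isIn "cdt.ch" ul) (PySem.Str.isIn "rsi.ch" ul) (PySem.Str.isIn "laregione.ch" ul)
      (PySem.Str.isIn "/de/" ul) (PySem.Str.isIn "/deutsch/" ul)
      (PySem.Str.isIn "/fr/" ul) (PySem.Str.isIn "/francais/" ul)
      (PySem.Str.isIn "/it/" ul) (PySem.Str.isIn "/italiano/" ul)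
      (PySem.Str.isIn "/rm/" ul) (PySem.Str.isIn "/romansh/" ul)
      (by
        intro h
        simp only [Bool.or_eq_true] at h
        rcases h with ((((((((h | h) | h) | h) | h) | h) | h) | h) | h) <;>
          exact isIn_ch_of_isIn _ _ (by decide) h)
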